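-- pv_equiv track=rewrite | github.com/davwil00/aoc2018 | day2/part1.py | count_doubles_and_triples
-- ===== SOURCE A (Python) =====
-- def count_doubles_and_triples(grouped_letters_list):
--     twos = 0
--     threes = 0
--     for grouped_letters in grouped_letters_list:
--         two_counted = False
--         three_counted = False
--         for key in grouped_letters.keys():
--             if grouped_letters[key] == 2 and not two_counted:
--                 twos += 1
--                 two_counted = True
--             elif grouped_letters[key] == 3 and not three_counted:
--                 threes += 1
--                 three_counted = True
--
--     return twos, threes
-- ===== SOURCE B (Python) =====
-- def count_doubles_and_triples(grouped_letters_list):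
--     twos = sum(1 for d in grouped_letters_list if 2 in d.values())
--     threes = sum(1 for d in grouped_letters_list if 3 in d.values())
--     return twos, threes
-- ===== Notes on version B (the rewrite author's own statement) =====
-- stated objective: simpler
-- what changed: Replaces the flag-carrying single pass over each dict's keys (with elif bookkeeping and per-key indexing) by two independent membership tests on d.values(), summed in two comprehensions.
import Mathlib
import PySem

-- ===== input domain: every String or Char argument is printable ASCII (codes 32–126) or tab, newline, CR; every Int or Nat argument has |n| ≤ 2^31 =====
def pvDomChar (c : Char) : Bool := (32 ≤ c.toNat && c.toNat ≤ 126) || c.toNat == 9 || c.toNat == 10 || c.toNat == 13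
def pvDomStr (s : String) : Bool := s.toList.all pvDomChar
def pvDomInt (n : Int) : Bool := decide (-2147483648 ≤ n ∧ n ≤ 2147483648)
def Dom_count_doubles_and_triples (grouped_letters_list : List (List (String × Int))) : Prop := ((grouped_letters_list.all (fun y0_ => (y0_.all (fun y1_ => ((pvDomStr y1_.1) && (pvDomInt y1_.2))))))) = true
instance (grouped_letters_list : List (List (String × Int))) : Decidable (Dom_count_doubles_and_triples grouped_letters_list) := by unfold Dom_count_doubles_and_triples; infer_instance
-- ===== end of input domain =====

-- B replaces A's flag-carrying single pass per dict (with elif bookkeeping) by two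
-- independent membership tests on the dict's values, summed separately (objective: simpler).

-- ===== PORT A =====
-- inner loop of A: over the dict's keys, carrying (twos, threes, two_counted, three_counted)
def pvInnerA (d : PySem.Dict String Int) (ks : List String) (st : Int × Int × Bool × Bool) : Int × Int × Bool × Bool :=
  ks.foldl (fun s key =>
    if d.getD key 0 = 2 ∧ s.2.2.1 = false then (s.1 + 1, s.2.1, true, s.2.2.2)
    else if d.getD key 0 = 3 ∧ s.2.2.2 = false then (s.1, s.2.1 + 1, s.2.2.1, true)
    else s) st

def count_doubles_and_triples (grouped_letters_list : List (List (String × Int))) : Int × Int :=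
  grouped_letters_list.foldl (fun (acc : Int × Int) pairs =>
    let d := PySem.Dict.ofList pairs
    let r := pvInnerA d d.keys (acc.1, acc.2, false, false)
    (r.1, r.2.1)) (0, 0)

-- ===== PORT B =====
def count_doubles_and_triples_alt (grouped_letters_list : List (List (String × Int))) : Int × Int :=
  (grouped_letters_list.foldl (fun (a : Int) pairs => a + (if (2 : Int) ∈ (PySem.Dict.ofList pairs).values then 1 else 0)) 0,
   grouped_letters_list.foldl (fun (a : Int) pairs => a + (if (3 : Int) ∈ (PySem.Dict.ofList pairs).values then 1 else 0)) 0)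

-- ===== PRECONDITION & SPEC =====
def Spec_count_doubles_and_triples (grouped_letters_list : List (List (String × Int))) (out : Int × Int) : Prop := out = count_doubles_and_triples_alt grouped_letters_list
instance (grouped_letters_list : List (List (String × Int))) (out : Int × Int) : Decidable (Spec_count_doubles_and_triples grouped_letters_list out) := by unfold Spec_count_doubles_and_triples; infer_instance

-- ===== CLAIM (what is proved, stated in full; the proofs are below) =====
def Claim_equal_count_doubles_and_triples : Prop := ∀ (grouped_letters_list : List (List (String × Int))), Dom_count_doubles_and_triples grouped_letters_list → Spec_count_doubles_and_triples grouped_letters_list (count_doubles_and_triples grouped_letters_list)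

-- ===== LEMMAS AND PROOFS =====

-- A's inner loop in closed form: each counter gains 1 iff its flag is clear and a key
-- with the matching value occurs; each flag is set iff it was set or such a key occurs.
theorem pvInnerA_closed (d : PySem.Dict String Int) (ks : List String)
    (t2 t3 : Int) (b2 b3 : Bool) :
    pvInnerA d ks (t2, t3, b2, b3) =
      (t2 + (if b2 = false ∧ ks.any (fun k => d.getD k 0 == 2) then 1 else 0),
       t3 + (if b3 = false ∧ ks.any (fun k => d.getD k 0 == 3) then 1 else 0),
       b2 || ks.any (fun k => d.getD k 0 == 2),
       b3 || ks.any (fun k => d.getD k 0 == 3)) := by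
  induction ks generalizing t2 t3 b2 b3 with
  | nil => simp [pvInnerA]
  | cons k ks ih =>
    simp only [pvInnerA, List.foldl_cons] at *
    by_cases h2 : d.getD k 0 = 2
    · have h3 : ¬ d.getD k 0 = 3 := by omega
      have e3 : (d.getD k 0 == 3) = false := by simpa using h3
      cases b2 <;> simp [h2, ih]
    · have e2 : (d.getD k 0 == 2) = false := by simpa using h2
      by_cases h3 : d.getD k 0 = 3
      · cases b3 <;> simp [h3, ih]
      · have e3 : (d.getD k 0 == 3) = false := by simpa using h3
        simp [h2, e2, h3, e3, ih]

theorem pvValuesMem (pairs : List (String × Int)) (v : Int) :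
    ((v ∈ (PySem.Dict.ofList pairs).values) ↔
      ((PySem.Dict.ofList pairs).keys.any (fun k => (PySem.Dict.ofList pairs).getD k 0 == v)) = true) := by
  rw [PySem.Dict.values_eq_map_keys _ (PySem.Dict.nodup_keys_ofList pairs) 0]
  simp [List.mem_map, List.any_eq_true]

-- B's accumulating fold as an initial value plus a sum of indicators
theorem pvFoldSum (g : List (String × Int) → Int) (lst : List (List (String × Int))) (a : Int) :
    lst.foldl (fun a p => a + g p) a = a + (lst.map g).sum := by
  induction lst generalizing a with
  | nil => simp
  | cons p rest ih => simp only [List.foldl_cons, List.map_cons, List.sum_cons]; rw [ih]; ring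

theorem pvMain (lst : List (List (String × Int))) (acc : Int × Int) :
    lst.foldl (fun (acc : Int × Int) pairs =>
      let d := PySem.Dict.ofList pairs
      let r := pvInnerA d d.keys (acc.1, acc.2, false, false)
      (r.1, r.2.1)) acc =
    (acc.1 + lst.foldl (fun (a : Int) pairs => a + (if (2 : Int) ∈ (PySem.Dict.ofList pairs).values then 1 else 0)) 0,
     acc.2 + lst.foldl (fun (a : Int) pairs => a + (if (3 : Int) ∈ (PySem.Dict.ofList pairs).values then 1 else 0)) 0) := by
  induction lst generalizing acc with
  | nil => simp
  | cons pairs rest ih =>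
    rw [List.foldl_cons, ih]
    simp only [pvFoldSum, List.map_cons, List.sum_cons, pvInnerA_closed, Prod.ext_iff]
    by_cases m2 : (2 : Int) ∈ (PySem.Dict.ofList pairs).values <;>
      by_cases m3 : (3 : Int) ∈ (PySem.Dict.ofList pairs).values <;>
        simp_all [pvValuesMem pairs 2, pvValuesMem pairs 3] <;> constructor <;> ring

-- ===== VERDICT (by name: the statement is the Claim_ definition above) =====
theorem count_doubles_and_triples_spec : Claim_equal_count_doubles_and_triples := by
  intro lst _
  unfold Spec_count_doubles_and_triples count_doubles_and_triples count_doubles_and_triples_alt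
  simpa using pvMain lst (0, 0)
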